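-- pv_equiv track=rewrite | github.com/TRMT-Yuka/NER-DA-for_Few-NERD | DA4ner.py | make_alterna_labels_for_O
-- ===== SOURCE A (Python) =====
-- def make_alterna_labels_for_O(data_list):
--     label_list = set()
--     for s in data_list:
--         for t in s:
--             if t[1] == "O" or "_O" in t[1][0]:
--                 label_list.add(t[1])
--
--     label_list = list(label_list)
--     alterna_labels = dict()
--     for label in label_list:
--         alterna_labels[label] = set()
--     for s in data_list:
--         for t in s:
--             token = "_".join(t[0])
--             tag = t[1]
--             if tag in label_list:
--                 alterna_labels[tag].add(token)
--
--     new_alterna_labels = dict()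
--     for k,v in alterna_labels.items():#候補が空白or1つのtagは削除
--         if v==set() or len(v) == 1:
--             pass
--         else:
--             new_alterna_labels[k] = v
--
--     return new_alterna_labels
-- ===== SOURCE B (Python) =====
-- def make_alterna_labels_for_O(data_list):
--     # Single pass: group tokens by qualifying tag as we go, then keep sets with >= 2 members.
--     groups = {}
--     for s in data_list:
--         for t in s:
--             tag = t[1]
--             if tag == "O" or "_O" in tag[0]:
--                 groups.setdefault(tag, set()).add("_".join(t[0]))
--     return {k: v for k, v in groups.items() if len(v) >= 2}
-- ===== Notes on version B (the rewrite author's own statement) =====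
-- stated objective: simpler
-- what changed: B replaces A's three passes (collect the qualifying-label set, initialise an empty set per label, then re-scan all tokens testing membership in that label list) by one pass that tests the condition directly on each token and groups via dict.setdefault, followed by a size>=2 comprehension.
import Mathlib
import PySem

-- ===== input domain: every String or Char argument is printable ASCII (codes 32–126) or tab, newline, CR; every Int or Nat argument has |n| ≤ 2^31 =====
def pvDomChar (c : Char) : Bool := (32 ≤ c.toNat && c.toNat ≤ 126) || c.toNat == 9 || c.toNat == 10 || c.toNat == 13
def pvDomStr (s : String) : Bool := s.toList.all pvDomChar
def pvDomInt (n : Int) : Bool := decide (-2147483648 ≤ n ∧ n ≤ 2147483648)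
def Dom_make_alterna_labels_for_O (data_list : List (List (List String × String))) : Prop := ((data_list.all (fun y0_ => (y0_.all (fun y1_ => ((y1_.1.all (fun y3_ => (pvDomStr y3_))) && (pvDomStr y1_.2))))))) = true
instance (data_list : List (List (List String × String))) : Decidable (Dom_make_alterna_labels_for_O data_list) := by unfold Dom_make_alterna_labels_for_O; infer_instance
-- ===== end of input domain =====

-- B builds the tag→token-set groups in ONE pass (dict.setdefault) instead of A's separate
-- label-collection pass, dict-initialisation pass and grouping pass; then keeps sets of size ≥ 2.

-- the token condition `t[1] == "O" or "_O" in t[1][0]` (identical text in both Pythons);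
-- `t[1][0]` raises IndexError on an empty tag — those inputs are excluded by Pre_ below.
def pvCond (tag : String) : Bool :=
  tag == "O" || (PySem.Str.pyGet? tag 0).elim false (fun c => PySem.Str.isIn "_O" (String.ofList [c]))

-- ===== PORT A =====
def make_alterna_labels_for_O (data_list : List (List (List String × String))) : List (String × List String) :=
  -- pass 1: label_list = set of qualifying tags
  let label_list : PySem.Set String :=
    data_list.foldl (fun acc s => s.foldl (fun acc t =>
      if pvCond t.2 then PySem.Set.add acc t.2 else acc) acc) PySem.Set.empty
  -- alterna_labels[label] = set() for each label
  let init : PySem.Dict String (PySem.Set String) :=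
    label_list.foldl (fun d l => d.insert l PySem.Set.empty) PySem.Dict.empty
  -- pass 2: group tokens under tags that are in label_list
  let alterna : PySem.Dict String (PySem.Set String) :=
    data_list.foldl (fun d s => s.foldl (fun d t =>
      if PySem.Set.contains label_list t.2 then
        d.modify t.2 PySem.Set.empty (fun v => PySem.Set.add v (PySem.Str.join "_" t.1))
      else d) d) init
  -- pass 3: drop entries whose set is empty or a singleton
  (alterna.items.foldl (fun nd kv =>
      if PySem.Set.equal kv.2 PySem.Set.empty || PySem.Set.len kv.2 == 1 then nd
      else nd.insert kv.1 kv.2) PySem.Dict.empty).items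

-- ===== PORT B =====
def make_alterna_labels_for_O_alt (data_list : List (List (List String × String))) : List (String × List String) :=
  -- single pass; `groups.setdefault(tag, set()).add(tok)` is exactly `modify tag ∅ (·.add tok)`
  let groups : PySem.Dict String (PySem.Set String) :=
    data_list.foldl (fun d s => s.foldl (fun d t =>
      if pvCond t.2 then
        d.modify t.2 PySem.Set.empty (fun v => PySem.Set.add v (PySem.Str.join "_" t.1))
      else d) d) PySem.Dict.empty
  -- dict comprehension over items with distinct keys = filter of the items
  groups.items.filter (fun kv => decide (2 ≤ PySem.Set.len kv.2))

-- ===== PRECONDITION & SPEC =====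
-- Pre_ excludes exactly the inputs where Python A raises IndexError: a token whose tag is the
-- empty string (it is not "O", so `t[1][0]` fails).
def Pre_make_alterna_labels_for_O (data_list : List (List (List String × String))) : Prop :=
  ∀ s ∈ data_list, ∀ t ∈ s, t.2 ≠ ""
instance (data_list : List (List (List String × String))) : Decidable (Pre_make_alterna_labels_for_O data_list) := by unfold Pre_make_alterna_labels_for_O; infer_instance

def pvWitness_make_alterna_labels_for_O : (List (List (List String × String))) :=
  [[(["New", "York"], "O"), (["LA"], "O"), (["x"], "B-loc")]]

def Spec_make_alterna_labels_for_O (data_list : List (List (List String × String))) (out : List (String × List String)) : Prop := out = make_alterna_labels_for_O_alt data_list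
instance (data_list : List (List (List String × String))) (out : List (String × List String)) : Decidable (Spec_make_alterna_labels_for_O data_list out) := by unfold Spec_make_alterna_labels_for_O; infer_instance

-- ===== CLAIM (what is proved, stated in full; the proofs are below) =====
def Claim_equal_make_alterna_labels_for_O : Prop := ∀ (data_list : List (List (List String × String))), Dom_make_alterna_labels_for_O data_list → Pre_make_alterna_labels_for_O data_list → Spec_make_alterna_labels_for_O data_list (make_alterna_labels_for_O data_list)

-- ===== LEMMAS AND PROOFS =====

def pvGroup (d : PySem.Dict String (PySem.Set String)) (t : List String × String) : PySem.Dict String (PySem.Set String) :=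
  d.modify t.2 PySem.Set.empty (fun v => PySem.Set.add v (PySem.Str.join "_" t.1))

theorem pvGroup_def (d : PySem.Dict String (PySem.Set String)) (t : List String × String) :
    d.modify t.2 PySem.Set.empty (fun v => PySem.Set.add v (PySem.Str.join "_" t.1)) = pvGroup d t := rfl

theorem pv_update_of_subset (xs : List String) : ∀ (s : PySem.Set String), (∀ x ∈ xs, x ∈ s) → PySem.Set.update s xs = s := by
  induction xs with
  | nil => intro s _; rfl
  | cons x xs ih =>
      intro s h
      have hx : PySem.Set.add s x = s := PySem.Set.add_of_mem (h x (by simp))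
      show PySem.Set.update (PySem.Set.add s x) xs = s
      rw [hx]; exact ih s (fun y hy => h y (by simp [hy]))

theorem pv_getD_init (L : List String) : ∀ (d : PySem.Dict String (PySem.Set String)) (k : String),
    d.getD k PySem.Set.empty = PySem.Set.empty →
    (L.foldl (fun d l => d.insert l PySem.Set.empty) d).getD k PySem.Set.empty = PySem.Set.empty := by
  induction L with
  | nil => intro d k h; exact h
  | cons l L ih =>
      intro d k h
      refine ih _ k ?_
      by_cases hk : k = l
      · subst hk; simp [PySem.Dict.getD_insert_self]
      · rw [PySem.Dict.getD_insert_of_ne d PySem.Set.empty PySem.Set.empty hk]; exact h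

theorem pv_getD_group (l : List (List String × String)) : ∀ (d : PySem.Dict String (PySem.Set String)) (k : String),
    (l.foldl pvGroup d).getD k PySem.Set.empty
      = PySem.Set.update (d.getD k PySem.Set.empty)
          ((l.filter (fun t => t.2 == k)).map (fun t => PySem.Str.join "_" t.1)) := by
  induction l with
  | nil => intro d k; rfl
  | cons t l ih =>
      intro d k
      show (l.foldl pvGroup (pvGroup d t)).getD k PySem.Set.empty = _
      rw [ih]
      by_cases hk : t.2 = k
      · have h1 : (pvGroup d t).getD k PySem.Set.empty
            = PySem.Set.add (d.getD k PySem.Set.empty) (PySem.Str.join "_" t.1) := by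
          simp [pvGroup, ← hk]
        rw [h1]
        simp [hk, PySem.Set.update]
      · have h1 : (pvGroup d t).getD k PySem.Set.empty = d.getD k PySem.Set.empty := by
          simp [pvGroup, PySem.Dict.getD_modify]
          intro h; exact absurd h.symm hk
        have h2 : (t.2 == k) = false := by simp [hk]
        rw [h1]
        simp [h2]

theorem pv_keep_eq (v : PySem.Set String) :
    (PySem.Set.equal v PySem.Set.empty || PySem.Set.len v == 1) = !(decide (2 ≤ PySem.Set.len v)) := by
  match v with
  | [] => rfl
  | [a] => rfl
  | a :: b :: l =>
      simp [PySem.Set.equal, PySem.Set.issubset, PySem.Set.contains, PySem.Set.len, PySem.Set.empty]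
      rw [Bool.eq_iff_iff]
      simp
      omega

theorem pv_pass3 (l : List (String × PySem.Set String)) (hnd : (l.map Prod.fst).Nodup) :
    (l.foldl (fun nd kv =>
        if PySem.Set.equal kv.2 PySem.Set.empty || PySem.Set.len kv.2 == 1 then nd
        else nd.insert kv.1 kv.2) PySem.Dict.empty).items
      = l.filter (fun kv => decide (2 ≤ PySem.Set.len kv.2)) := by
  have hstep : ∀ (nd : PySem.Dict String (PySem.Set String)), ∀ kv ∈ l,
      (if PySem.Set.equal kv.2 PySem.Set.empty || PySem.Set.len kv.2 == 1 then nd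
       else nd.insert kv.1 kv.2)
        = (if decide (2 ≤ PySem.Set.len kv.2) then nd.insert kv.1 kv.2 else nd) := by
    intro nd kv _
    rw [pv_keep_eq]
    cases decide (2 ≤ PySem.Set.len kv.2) <;> rfl
  rw [PySem.List.foldl_congr_mem l _ _ PySem.Dict.empty hstep, ← List.foldl_filter,
    PySem.Dict.items_foldl_insert_fresh (l.filter (fun kv => decide (2 ≤ PySem.Set.len kv.2)))
      Prod.fst Prod.snd PySem.Dict.empty (fun a _ => rfl)
      (hnd.sublist (List.filter_sublist.map Prod.fst))]
  simp [PySem.Dict.empty]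

theorem pv_main (ts : List (List String × String)) :
    ((ts.foldl (fun d t =>
        if PySem.Set.contains (ts.foldl (fun acc t => if pvCond t.2 then PySem.Set.add acc t.2 else acc) PySem.Set.empty) t.2
        then pvGroup d t else d)
        ((ts.foldl (fun acc t => if pvCond t.2 then PySem.Set.add acc t.2 else acc) PySem.Set.empty).foldl
          (fun d l => d.insert l PySem.Set.empty) PySem.Dict.empty)).items.foldl
      (fun nd kv =>
        if PySem.Set.equal kv.2 PySem.Set.empty || PySem.Set.len kv.2 == 1 then nd
        else nd.insert kv.1 kv.2) PySem.Dict.empty).items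
    = ((ts.foldl (fun d t => if pvCond t.2 then pvGroup d t else d) PySem.Dict.empty).items).filter
        (fun kv => decide (2 ≤ PySem.Set.len kv.2)) := by
  set F : List (List String × String) := ts.filter (fun t => pvCond t.2) with hF
  set qs : List String := F.map (fun t => t.2) with hqs
  have hlab : ts.foldl (fun acc t => if pvCond t.2 then PySem.Set.add acc t.2 else acc) PySem.Set.empty
      = PySem.Set.ofList qs := by
    rw [PySem.Set.ofList_eq_foldl, hqs, List.foldl_map, hF, List.foldl_filter]
    rfl
  rw [hlab]
  set L : PySem.Set String := PySem.Set.ofList qs with hL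
  have hLnd : L.Nodup := PySem.Set.nodup_ofList qs
  have hLqs : PySem.Set.ofList L = L := PySem.Set.ofList_eq_self_of_nodup L hLnd
  have hqsL : ∀ x ∈ qs, x ∈ L := fun x hx => (PySem.Set.mem_ofList qs x).mpr hx
  have hqsCond : ∀ x ∈ qs, pvCond x = true := by
    intro x hx
    rw [hqs] at hx
    rcases List.mem_map.mp hx with ⟨t, ht, rfl⟩
    rw [hF] at ht
    exact (List.mem_filter.mp ht).2
  -- A's membership test agrees with the condition on every token of the stream
  have hmem : ∀ (d : PySem.Dict String (PySem.Set String)), ∀ t ∈ ts,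
      (if PySem.Set.contains L t.2 then pvGroup d t else d)
        = (if pvCond t.2 then pvGroup d t else d) := by
    intro d t ht
    have hcont : PySem.Set.contains L t.2 = pvCond t.2 := by
      by_cases hc : pvCond t.2 = true
      · have h1 : t.2 ∈ qs := by
          rw [hqs, hF]; exact List.mem_map_of_mem (List.mem_filter.mpr ⟨ht, hc⟩)
        have h2 : t.2 ∈ L := hqsL _ h1
        simp [PySem.Set.contains, h2, hc]
      · have hc' : pvCond t.2 = false := Bool.eq_false_iff.mpr hc
        rw [hc']
        rw [Bool.eq_false_iff]
        intro habs
        have : t.2 ∈ L := by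
          have := habs
          simpa [PySem.Set.contains] using this
        exact hc (hqsCond _ ((PySem.Set.mem_ofList qs t.2).mp this))
    rw [hcont]
  rw [PySem.List.foldl_congr_mem ts _ _ _ hmem]
  -- both grouping folds, written over the filtered stream
  have hfoldA : ts.foldl (fun d t => if pvCond t.2 then pvGroup d t else d)
      (L.foldl (fun d l => d.insert l PySem.Set.empty) PySem.Dict.empty)
      = F.foldl pvGroup (L.foldl (fun d l => d.insert l PySem.Set.empty) PySem.Dict.empty) := by
    rw [hF, List.foldl_filter]
  have hfoldB : ts.foldl (fun d t => if pvCond t.2 then pvGroup d t else d) PySem.Dict.empty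
      = F.foldl pvGroup PySem.Dict.empty := by
    rw [hF, List.foldl_filter]
  rw [hfoldA, hfoldB]
  set initA : PySem.Dict String (PySem.Set String) :=
    L.foldl (fun d l => d.insert l PySem.Set.empty) PySem.Dict.empty with hinit
  set dictA := F.foldl pvGroup initA with hdA
  set dictB := F.foldl pvGroup PySem.Dict.empty with hdB
  have hkeysInit : initA.keys = L := by
    rw [hinit, PySem.Dict.keys_foldl_insert L (fun _ _ => PySem.Set.empty) PySem.Dict.empty]
    show PySem.Set.ofList L = L
    exact hLqs
  have hkeysA : dictA.keys = L := by
    rw [hdA, show pvGroup = (fun d (t : List String × String) =>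
        d.modify t.2 PySem.Set.empty (fun v => PySem.Set.add v (PySem.Str.join "_" t.1))) from rfl,
      PySem.Dict.keys_foldl_modify_key F (fun t => t.2) PySem.Set.empty
        (fun _ t => fun v => PySem.Set.add v (PySem.Str.join "_" t.1)) initA,
      hkeysInit, ← hqs]
    exact pv_update_of_subset qs L hqsL
  have hkeysB : dictB.keys = L := by
    rw [hdB, show pvGroup = (fun d (t : List String × String) =>
        d.modify t.2 PySem.Set.empty (fun v => PySem.Set.add v (PySem.Str.join "_" t.1))) from rfl,
      PySem.Dict.keys_foldl_modify_key F (fun t => t.2) PySem.Set.empty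
        (fun _ t => fun v => PySem.Set.add v (PySem.Str.join "_" t.1)) PySem.Dict.empty,
      ← hqs]
    show PySem.Set.ofList qs = L
    rfl
  have hgetD : ∀ k, dictA.getD k PySem.Set.empty = dictB.getD k PySem.Set.empty := by
    intro k
    rw [hdA, hdB, pv_getD_group, pv_getD_group]
    have h1 : initA.getD k PySem.Set.empty = PySem.Set.empty := pv_getD_init L PySem.Dict.empty k rfl
    have h2 : (PySem.Dict.empty : PySem.Dict String (PySem.Set String)).getD k PySem.Set.empty = PySem.Set.empty := rfl
    rw [h1, h2]
  have hitems : dictA.items = dictB.items := by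
    rw [PySem.Dict.items_eq_map_keys dictA (hkeysA ▸ hLnd) PySem.Set.empty,
      PySem.Dict.items_eq_map_keys dictB (hkeysB ▸ hLnd) PySem.Set.empty, hkeysA, hkeysB]
    exact List.map_congr_left (fun k _ => by rw [hgetD k])
  rw [hitems]
  exact pv_pass3 dictB.items (by
    have := hkeysB ▸ hLnd
    simpa [PySem.Dict.keys] using this)

-- ===== VERDICT (by name: the statement is the Claim_ definition above) =====
theorem make_alterna_labels_for_O_spec : Claim_equal_make_alterna_labels_for_O := by
  intro data_list _ _
  unfold Spec_make_alterna_labels_for_O make_alterna_labels_for_O make_alterna_labels_for_O_alt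
  simp only [← List.foldl_flatten, pvGroup_def]
  exact pv_main data_list.flatten
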